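-- pv_equiv track=rewrite | github.com/D17AN/University-Projects | Year 1 - Semester 1/Fundamentals of Programming/Labs/a1-911/p3.py | finding_the_nth_element
-- ===== SOURCE A (Python) =====
-- def finding_the_nth_element(n):
--     if n == 1:
--         return 1
--
--     i = 1  # initializing an iterator
--     nr = 2
--     while i < n:  # while the nth element wasn't found
--         divisor = 2
--         nr_copy = nr
--         while nr_copy > 1:  # decomposing in prime factors
--             if nr_copy % divisor == 0:  # if a prime divisor was found
--                 i = i + 1
--                 while nr_copy % divisor == 0:  # divide the number with the prime divisor until it won't be divisible
--                     nr_copy = nr_copy // divisor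
--             divisor = divisor + 1
--             if i == n:  # if the nth element was found
--                 return divisor - 1
--         nr = nr + 1
-- ===== SOURCE B (Python) =====
-- def finding_the_nth_element(n):
--     if n == 1:
--         return 1
--     count = 1
--     nr = 2
--     while True:
--         ps = []
--         m = nr
--         d = 2
--         while d * d <= m:
--             if m % d == 0:
--                 ps.append(d)
--                 while m % d == 0:
--                     m //= d
--             d += 1
--         if m > 1:
--             ps.append(m)
--         if count + len(ps) >= n:
--             return ps[n - count - 1]
--         count += len(ps)
--         nr += 1
-- ===== Notes on version B (the rewrite author's own statement) =====
-- stated objective: faster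
-- what changed: Per number, B factors with sqrt-bounded trial division (stop when d*d > m, append the prime remainder) and checks the whole distinct-factor list at once against the target count, instead of A's trial division by every divisor up to the largest prime factor with the counter checked inside the factorization loop.
-- outside the precondition, e.g. on finding_the_nth_element(0): A returns None, B raises IndexError; on finding_the_nth_element(-3): A returns None, B raises IndexError
import Mathlib
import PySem

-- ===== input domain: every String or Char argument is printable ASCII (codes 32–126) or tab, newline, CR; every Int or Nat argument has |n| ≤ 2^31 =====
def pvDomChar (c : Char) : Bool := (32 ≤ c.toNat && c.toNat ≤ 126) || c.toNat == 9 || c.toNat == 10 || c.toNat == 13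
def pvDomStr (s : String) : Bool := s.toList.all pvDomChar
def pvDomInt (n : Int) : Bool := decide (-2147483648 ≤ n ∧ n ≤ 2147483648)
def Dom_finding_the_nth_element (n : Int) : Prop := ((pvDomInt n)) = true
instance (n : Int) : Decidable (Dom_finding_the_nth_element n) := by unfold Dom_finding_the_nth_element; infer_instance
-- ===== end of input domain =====

-- B replaces A's full trial division of every number (divisors up to the largest prime
-- factor) by sqrt-bounded factorization per number; measurably faster, same return value.

-- ===== PORT A =====
-- shared inner-inner while loop of both Pythons: `while m % d == 0: m //= d`.
-- fuel makes the loop total; fuel = m always suffices since m strictly decreases.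
def pvStrip : Nat → Nat → Nat → Nat
  | 0, m, _ => m
  | f + 1, m, d => if 2 ≤ d ∧ d ∣ m ∧ 0 < m then pvStrip f (m / d) d else m

-- A's inner while loop `while nr_copy > 1`: .inl p = `return divisor - 1` fired with value p,
-- .inr i' = loop finished with iterator i'.  fuel = nr suffices (divisor only has to reach
-- nr's largest prime factor); the `m ≤ 1` test is Python's loop condition.
def pvInnerA : Nat → Nat → Nat → Nat → Nat → Sum Nat Nat
  | fuel, m, d, i, n =>
    if m ≤ 1 then .inr i
    else match fuel with
      | 0 => .inr i
      | f + 1 =>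
        if d ∣ m then
          -- i = i + 1; strip; divisor = d + 1; if i == n: return divisor - 1
          if i + 1 = n then .inl d else pvInnerA f (pvStrip m m d) (d + 1) (i + 1) n
        else
          if i = n then .inl d else pvInnerA f m (d + 1) i n

-- A's outer while loop `while i < n`; fuel = n suffices (i gains at least 1 per nr);
-- the fall-off-the-end path (Python returns None) yields 0 and is excluded by Pre_.
def pvOuterA : Nat → Nat → Nat → Nat → Int
  | 0, _, _, _ => 0
  | f + 1, nr, i, n =>
    if i < n then
      match pvInnerA nr nr 2 i n with
      | .inl p => (p : Int)
      | .inr i' => pvOuterA f (nr + 1) i' n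
    else 0

def finding_the_nth_element (n : Int) : Int :=
  if n = 1 then 1 else pvOuterA n.toNat 2 1 n.toNat

-- ===== PORT B =====
-- Source B's sqrt-bounded factor list of nr: `while d*d <= m: …` then `if m > 1: ps.append(m)`.
-- fuel = m suffices; the `2 ≤ d` conjunct only makes the strip total (d starts at 2).
def pvDpfB : Nat → Nat → Nat → List Nat
  | fuel, m, d =>
    if m < d * d then (if 2 ≤ m then [m] else [])
    else match fuel with
      | 0 => []
      | f + 1 =>
        if 2 ≤ d ∧ d ∣ m then d :: pvDpfB f (pvStrip m m d) (d + 1)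
        else pvDpfB f m (d + 1)

-- Source B's `while True` loop; fuel = n suffices (count gains at least 1 per nr).
def pvOuterB : Nat → Nat → Nat → Nat → Int
  | 0, _, _, _ => 0
  | f + 1, count, nr, n =>
    let ps := pvDpfB nr nr 2
    if n ≤ count + ps.length then ((ps.getD (n - count - 1) 0 : Nat) : Int)
    else pvOuterB f (count + ps.length) (nr + 1) n

def finding_the_nth_element_alt (n : Int) : Int :=
  if n = 1 then 1 else pvOuterB n.toNat 1 2 n.toNat

-- ===== PRECONDITION & SPEC =====
-- Pre_ excludes n ≤ 0, where A falls off the loop and returns None (not an int).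
def Pre_finding_the_nth_element (n : Int) : Prop := 1 ≤ n
instance (n : Int) : Decidable (Pre_finding_the_nth_element n) := by
  unfold Pre_finding_the_nth_element; infer_instance

def pvWitness_finding_the_nth_element : Int := 7

def Spec_finding_the_nth_element (n : Int) (out : Int) : Prop := out = finding_the_nth_element_alt n
instance (n : Int) (out : Int) : Decidable (Spec_finding_the_nth_element n out) := by unfold Spec_finding_the_nth_element; infer_instance

-- ===== CLAIM (what is proved, stated in full; the proofs are below) =====
def Claim_equal_finding_the_nth_element : Prop := ∀ (n : Int), Dom_finding_the_nth_element n → Pre_finding_the_nth_element n → Spec_finding_the_nth_element n (finding_the_nth_element n)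

-- ===== LEMMAS AND PROOFS =====

-- "what A does with the factor list": take the (n-i)th element if there are enough,
-- otherwise report the advanced iterator.
def pvStep (L : List Nat) (i n : Nat) : Sum Nat Nat :=
  if n ≤ i + L.length then .inl (L.getD (n - i - 1) 0) else .inr (i + L.length)

theorem pvStrip_spec : ∀ (f m d : Nat), 2 ≤ d → 1 ≤ m → m ≤ f →
    pvStrip f m d ∣ m ∧ 1 ≤ pvStrip f m d ∧ ¬ d ∣ pvStrip f m d := by
  intro f
  induction f with
  | zero => intro m d _ hm hf; omega
  | succ f ih =>
    intro m d hd hm hf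
    unfold pvStrip
    by_cases h : d ∣ m
    · have hcond : 2 ≤ d ∧ d ∣ m ∧ 0 < m := ⟨hd, h, hm⟩
      simp only [if_pos hcond]
      have hdpos : 0 < d := by omega
      have hq1 : 1 ≤ m / d := Nat.one_le_div_iff hdpos |>.mpr (Nat.le_of_dvd hm h)
      have hqlt : m / d < m := Nat.div_lt_self hm hd
      have := ih (m / d) d hd hq1 (by omega)
      exact ⟨this.1.trans (Nat.div_dvd_of_dvd h), this.2.1, this.2.2⟩
    · have hcond : ¬ (2 ≤ d ∧ d ∣ m ∧ 0 < m) := by tauto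
      simp only [if_neg hcond]
      exact ⟨dvd_rfl, hm, h⟩

theorem pvStrip_lt (f m d : Nat) (hd : 2 ≤ d) (h : d ∣ m) (hm : 1 ≤ m) (hf : m ≤ f) :
    pvStrip f m d < m := by
  cases f with
  | zero => omega
  | succ f =>
    unfold pvStrip
    have hcond : 2 ≤ d ∧ d ∣ m ∧ 0 < m := ⟨hd, h, hm⟩
    simp only [if_pos hcond]
    have hdpos : 0 < d := by omega
    have hq1 : 1 ≤ m / d := Nat.one_le_div_iff hdpos |>.mpr (Nat.le_of_dvd hm h)
    have hqlt : m / d < m := Nat.div_lt_self hm hd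
    have := pvStrip_spec f (m / d) d hd hq1 (by omega)
    have hle : pvStrip f (m / d) d ≤ m / d := Nat.le_of_dvd hq1 this.1
    omega

-- every m ≥ 2 whose divisors below d have been ruled out still has a prime factor ≥ d, so d ≤ m
theorem pvSmallestFactor (m d : Nat) (hm : 2 ≤ m)
    (hnd : ∀ k, 2 ≤ k → k < d → ¬ k ∣ m) : d ≤ m := by
  obtain ⟨p, hp, hpd⟩ := Nat.exists_prime_and_dvd (by omega : m ≠ 1)
  have hp2 : 2 ≤ p := hp.two_le
  have hpm : p ≤ m := Nat.le_of_dvd (by omega) hpd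
  by_contra hlt
  exact hnd p hp2 (by omega) hpd

-- if d ∣ m, m < d*d and no smaller divisor exists, then m = d
theorem pvEqOfDvdSq (m d : Nat) (hd : 2 ≤ d) (hm : 2 ≤ m) (h : d ∣ m) (hsq : m < d * d)
    (hnd : ∀ k, 2 ≤ k → k < d → ¬ k ∣ m) : m = d := by
  obtain ⟨c, hc⟩ := h
  have hcdvd : c ∣ m := ⟨d, by rw [hc, Nat.mul_comm]⟩
  have hcd : c < d := by
    have hlt : d * c < d * d := hc ▸ hsq
    exact Nat.lt_of_mul_lt_mul_left hlt
  have hc1 : c = 1 := by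
    rcases Nat.lt_or_ge c 2 with h2 | h2
    · interval_cases c <;> omega
    · exact absurd hcdvd (hnd c h2 hcd)
  subst hc1
  omega

theorem pvStrip_one : ∀ (f d : Nat), 2 ≤ d → pvStrip f 1 d = 1 := by
  intro f d hd
  cases f with
  | zero => rfl
  | succ f =>
    unfold pvStrip
    have : ¬ (2 ≤ d ∧ d ∣ 1 ∧ 0 < 1) := by
      rintro ⟨_, hdd, _⟩; exact absurd (Nat.le_of_dvd one_pos hdd) (by omega)
    rw [if_neg this]

theorem pvStrip_self (f d : Nat) (hd : 2 ≤ d) (hf : 1 ≤ f) : pvStrip f d d = 1 := by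
  cases f with
  | zero => omega
  | succ f =>
    unfold pvStrip
    have hcond : 2 ≤ d ∧ d ∣ d ∧ 0 < d := ⟨hd, dvd_rfl, by omega⟩
    simp only [if_pos hcond, Nat.div_self (by omega : 0 < d)]
    exact pvStrip_one f d hd

theorem pvDpfB_stop (f m d : Nat) (h : m < d * d) :
    pvDpfB f m d = if 2 ≤ m then [m] else [] := by
  unfold pvDpfB; simp [h]

theorem pvDpfB_div (f m d : Nat) (h : ¬ m < d * d) (h2 : 2 ≤ d) (h3 : d ∣ m) :
    pvDpfB (f + 1) m d = d :: pvDpfB f (pvStrip m m d) (d + 1) := by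
  conv_lhs => unfold pvDpfB
  simp [h, h2, h3]

theorem pvDpfB_skip (f m d : Nat) (h : ¬ m < d * d) (hc : ¬ (2 ≤ d ∧ d ∣ m)) :
    pvDpfB (f + 1) m d = pvDpfB f m (d + 1) := by
  conv_lhs => unfold pvDpfB
  simp [h, hc]

theorem pvStep_cons (p : Nat) (R : List Nat) (i n : Nat) (hin : i < n) :
    pvStep (p :: R) i n = if i + 1 = n then .inl p else pvStep R (i + 1) n := by
  unfold pvStep
  by_cases h1 : i + 1 = n
  · have : n ≤ i + (p :: R).length := by simp [List.length_cons]; omega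
    simp [this, ← h1]
  · have hlen : (p :: R).length = R.length + 1 := by simp
    by_cases h2 : n ≤ i + 1 + R.length
    · have : n ≤ i + (p :: R).length := by omega
      simp only [if_pos this, if_neg h1, if_pos h2]
      have hidx : n - i - 1 = (n - (i + 1) - 1) + 1 := by omega
      simp [hidx]
    · have : ¬ n ≤ i + (p :: R).length := by omega
      simp only [if_neg this, if_neg h1, if_neg h2]
      congr 1
      omega

-- core characterization: A's inner loop computes pvStep of B's factor list
theorem pvInner_char : ∀ (f g m d i n : Nat), 2 ≤ d → 1 ≤ m →
    (∀ k, 2 ≤ k → k < d → ¬ k ∣ m) → i < n → m + 2 ≤ f + d → m + 2 ≤ g + d →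
    pvInnerA f m d i n = pvStep (pvDpfB g m d) i n := by
  intro f
  induction f with
  | zero =>
    intro g m d i n hd hm hnd hin hf hg
    have hm1 : m = 1 := by
      by_contra h
      have := pvSmallestFactor m d (by omega) hnd
      omega
    subst hm1
    unfold pvInnerA pvDpfB
    have : (1 : Nat) < d * d := by nlinarith
    simp [pvStep, this, Nat.not_le.mpr hin]
  | succ f ih =>
    intro g m d i n hd hm hnd hin hf hg
    by_cases hm1 : m ≤ 1
    · have hm1' : m = 1 := by omega
      subst hm1'
      unfold pvInnerA pvDpfB
      have : (1 : Nat) < d * d := by nlinarith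
      simp [pvStep, this, Nat.not_le.mpr hin]
    · have hm2 : 2 ≤ m := by omega
      have hdm : d ≤ m := pvSmallestFactor m d hm2 hnd
      obtain ⟨g', hg'⟩ : ∃ g', g = g' + 1 := ⟨g - 1, by omega⟩
      subst hg'
      unfold pvInnerA
      simp only [if_neg (by omega : ¬ m ≤ 1)]
      by_cases hdvd : d ∣ m
      · simp only [if_pos hdvd]
        by_cases hsq : m < d * d
        · -- then m = d, the list is [m]
          have hmd : m = d := pvEqOfDvdSq m d hd hm2 hdvd hsq hnd
          have hlist : pvDpfB (g' + 1) m d = [m] := by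
            rw [pvDpfB_stop _ _ _ hsq]; simp [hm2]
          rw [hlist]
          rw [pvStep_cons m [] i n hin]
          by_cases hi1 : i + 1 = n
          · simp [hi1, hmd]
          · simp only [if_neg hi1]
            have hstrip : pvStrip m m d = 1 := by rw [hmd]; exact pvStrip_self d d hd (by omega)
            rw [hstrip]
            unfold pvInnerA pvStep
            simp
            omega
        · -- d*d ≤ m: list is d :: rest
          have hnsq : ¬ m < d * d := hsq
          rw [pvDpfB_div g' m d hnsq hd hdvd, pvStep_cons d _ i n hin]
          by_cases hi1 : i + 1 = n
          · simp [hi1]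
          · simp only [if_neg hi1]
            set m' := pvStrip m m d with hm'
            have hspec := pvStrip_spec m m d hd (by omega) le_rfl
            have hlt : m' < m := pvStrip_lt m m d hd hdvd (by omega) le_rfl
            have hm'1 : 1 ≤ m' := hspec.2.1
            have hnd' : ∀ k, 2 ≤ k → k < d + 1 → ¬ k ∣ m' := by
              intro k hk2 hkd hkdvd
              by_cases hkd' : k = d
              · subst hkd'; exact hspec.2.2 hkdvd
              · exact hnd k hk2 (by omega) (hkdvd.trans hspec.1)
            exact ih g' m' (d + 1) (i + 1) n (by omega) hm'1 hnd' (by omega)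
              (by omega) (by omega)
      · simp only [if_neg hdvd, if_neg (by omega : ¬ i = n)]
        have hnd' : ∀ k, 2 ≤ k → k < d + 1 → ¬ k ∣ m := by
          intro k hk2 hkd
          by_cases hkd' : k = d
          · exact hkd' ▸ hdvd
          · exact hnd k hk2 (by omega)
        by_cases hsq : m < d * d
        · have hlist : pvDpfB (g' + 1) m d = [m] := by
            rw [pvDpfB_stop _ _ _ hsq]; simp [hm2]
          have hlist' : pvDpfB g' m (d + 1) = [m] := by
            have hlt : m < (d + 1) * (d + 1) := by nlinarith
            rw [pvDpfB_stop _ _ _ hlt]; simp [hm2]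
          rw [hlist, ← hlist']
          exact ih g' m (d + 1) i n (by omega) (by omega) hnd' hin (by omega) (by omega)
        · have hlist : pvDpfB (g' + 1) m d = pvDpfB g' m (d + 1) := by
            exact pvDpfB_skip g' m d hsq (by tauto)
          rw [hlist]
          exact ih g' m (d + 1) i n (by omega) (by omega) hnd' hin (by omega) (by omega)

theorem pvOuter_eq : ∀ (f nr i n : Nat), 2 ≤ nr → i < n →
    pvOuterA f nr i n = pvOuterB f i nr n := by
  intro f
  induction f with
  | zero => intro nr i n _ _; rfl
  | succ f ih =>
    intro nr i n hnr hin
    unfold pvOuterA pvOuterB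
    simp only [if_pos hin]
    have hchar := pvInner_char nr nr nr 2 i n le_rfl (by omega)
      (by intro k hk2 hkd; omega) hin (by omega) (by omega)
    rw [hchar]
    unfold pvStep
    by_cases hle : n ≤ i + (pvDpfB nr nr 2).length
    · simp [hle]
    · simp only [if_neg hle]
      exact ih (nr + 1) (i + (pvDpfB nr nr 2).length) n (by omega) (by omega)

-- ===== VERDICT (by name: the statement is the Claim_ definition above) =====
theorem finding_the_nth_element_spec : Claim_equal_finding_the_nth_element := by
  unfold Claim_equal_finding_the_nth_element
  intro n _ hpre
  unfold Spec_finding_the_nth_element finding_the_nth_element finding_the_nth_element_alt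
  by_cases h1 : n = 1
  · simp [h1]
  · have h2 : (2 : Int) ≤ n := by
      unfold Pre_finding_the_nth_element at hpre; omega
    have hn2 : 2 ≤ n.toNat := by omega
    simp only [if_neg h1]
    exact pvOuter_eq n.toNat 2 1 n.toNat le_rfl (by omega)
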